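-- pv_equiv track=rewrite | github.com/t-tsekov/codefights-solutions | interview/stringReformatting.py | stringReformatting
-- ===== SOURCE A (Python) =====
-- def stringReformatting(s, k):
--     s = s.replace("-", "")
--     first = len(s) % k
--     res = ""
--     if first != 0:
--         res += s[:first] + "-"
--         s = s[first:]
--
--     for i in range(len(s)):
--         res += s[i]
--         if (i + 1) % k == 0:
--             res += "-"
--
--     return res[:-1]
-- ===== SOURCE B (Python) =====
-- def stringReformatting(s, k):
--     s = s.replace("-", "")
--     first = len(s) % k
--     chunks = []
--     if first != 0:
--         chunks.append(s[:first])
--     for i in range(first, len(s), k):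
--         chunks.append(s[i:i+k])
--     return "-".join(chunks)
-- ===== Notes on version B (the rewrite author's own statement) =====
-- stated objective: simpler
-- what changed: B slices the stripped string into whole k-sized chunks (stepping chunk boundaries) and joins them with '-', instead of A's character-by-character accumulation with a modular dash counter and a trailing-dash strip.
-- outside the precondition, e.g. on stringReformatting('abcde', -2): A returns 'abcd-', B returns 'abcd'
import Mathlib
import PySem

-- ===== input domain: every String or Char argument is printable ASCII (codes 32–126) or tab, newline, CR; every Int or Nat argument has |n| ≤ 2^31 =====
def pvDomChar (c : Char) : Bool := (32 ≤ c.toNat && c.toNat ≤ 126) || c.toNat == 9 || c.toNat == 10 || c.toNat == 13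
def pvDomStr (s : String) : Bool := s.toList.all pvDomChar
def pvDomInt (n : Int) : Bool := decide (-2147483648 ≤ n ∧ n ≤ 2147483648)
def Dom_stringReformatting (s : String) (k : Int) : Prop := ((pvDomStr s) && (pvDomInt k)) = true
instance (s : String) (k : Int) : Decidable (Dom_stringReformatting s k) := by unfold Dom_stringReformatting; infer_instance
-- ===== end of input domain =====

-- B regroups the dash-stripped string by slicing whole k-sized chunks and joining them with '-',
-- instead of A's character-by-character accumulation with a modular dash counter and trailing-dash strip (objective: simpler).


-- ===== PORT A =====
def stringReformatting (s : String) (k : Int) : String :=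
  let t : List Char := PySem.Chars.replace s.toList ['-'] []          -- s = s.replace("-", "")
  let first : Int := PySem.Int.mod (PySem.Chars.len t) k              -- first = len(s) % k
  let res : List Char :=                                              -- res = ""; if first != 0: res += s[:first] + "-"
    if first ≠ 0 then [] ++ PySem.Chars.slice t none (some first) ++ ['-'] else []
  let t2 : List Char :=                                               -- s = s[first:]
    if first ≠ 0 then PySem.Chars.slice t (some first) none else t
  let res2 : List Char :=                                             -- for i in range(len(s)): res += s[i]; if (i+1)%k==0: res += "-"
    (PySem.List.pyRange 0 (PySem.Chars.len t2)).foldl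
      (fun r i =>
        if PySem.Int.mod (i + 1) k = 0 then (r ++ [PySem.List.pyGetD t2 i ' ']) ++ ['-']
        else r ++ [PySem.List.pyGetD t2 i ' '])                       -- s[i] is in range here, so pyGetD is exact
      res
  String.mk (PySem.Chars.slice res2 none (some (-1)))                 -- return res[:-1]

-- ===== PORT B =====
def stringReformatting_alt (s : String) (k : Int) : String :=
  let t : List Char := PySem.Chars.replace s.toList ['-'] []          -- s = s.replace("-", "")
  let first : Int := PySem.Int.mod (PySem.Chars.len t) k              -- first = len(s) % k
  let chunks : List (List Char) :=                                    -- chunks = []; if first != 0: chunks.append(s[:first])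
    (if first ≠ 0 then [PySem.Chars.slice t none (some first)] else []) ++
    (PySem.List.pyRange first (PySem.Chars.len t) k).map              -- for i in range(first, len(s), k): chunks.append(s[i:i+k])
      (fun i => PySem.Chars.slice t (some i) (some (i + k)))
  String.mk (PySem.Chars.join ['-'] chunks)                           -- return "-".join(chunks)

-- ===== PRECONDITION & SPEC =====
-- Pre_ excludes k ≤ 0, outside the task's natural domain of positive chunk sizes: k == 0 makes A (and B)
-- raise ZeroDivisionError, and for negative k A's negative modulus and end-relative slicing produce an
-- accidental dash-mangled value (e.g. 'abcd-' for ('abcde', -2)).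
def Pre_stringReformatting (s : String) (k : Int) : Prop := 1 ≤ k
instance (s : String) (k : Int) : Decidable (Pre_stringReformatting s k) := by unfold Pre_stringReformatting; infer_instance
def pvWitness_stringReformatting : String × Int := ("ab-cdefg", 3)

def Spec_stringReformatting (s : String) (k : Int) (out : String) : Prop := out = stringReformatting_alt s k
instance (s : String) (k : Int) (out : String) : Decidable (Spec_stringReformatting s k out) := by unfold Spec_stringReformatting; infer_instance

-- ===== CLAIM (what is proved, stated in full; the proofs are below) =====
def Claim_equal_stringReformatting : Prop := ∀ (s : String) (k : Int), Dom_stringReformatting s k → Pre_stringReformatting s k → Spec_stringReformatting s k (stringReformatting s k)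

-- ===== LEMMAS AND PROOFS =====

-- the list of k-sized chunks of u (u's length is a multiple of K wherever this is used)
def chunkB (K : Nat) (u : List Char) : List (List Char) :=
  if h : u = [] ∨ K = 0 then [] else u.take K :: chunkB K (u.drop K)
termination_by u.length
decreasing_by
  push_neg at h
  have := List.length_pos_of_ne_nil h.1
  simp only [List.length_drop]
  omega

-- flattening chunks each followed by a dash = the dash-join plus one trailing dash
theorem pvJoinDash : ∀ (p : List Char) (cs : List (List Char)),
    ((p :: cs).map (· ++ ['-'])).flatten = PySem.Chars.join ['-'] (p :: cs) ++ ['-']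
  | p, [] => by simp [PySem.Chars.join_singleton]
  | p, q :: rest => by
      have ih := pvJoinDash q rest
      simp only [List.map_cons, List.flatten_cons] at ih ⊢
      rw [ih, PySem.Chars.join_cons_cons]
      simp [List.append_assoc]

-- a consecutive index range read through pyGetD is a slice
theorem pvSegMap (t : List Char) (d : Char) :
    ∀ (c j : Nat), j + c ≤ t.length →
    (PySem.List.pyRange (j : Int) ((j : Int) + (c : Int))).flatMap
        (fun i => [PySem.List.pyGetD t i d]) = (t.drop j).take c := by
  intro c
  induction c with
  | zero =>
    intro j _
    rw [PySem.List.pyRange_one_eq_nil (by omega)]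
    simp
  | succ c ih =>
    intro j h
    rw [PySem.List.pyRange_one_cons (by omega)]
    rw [show ((j : Int) + 1) = ((j + 1 : Nat) : Int) by omega,
        show ((j : Int) + ((c + 1 : Nat) : Int)) = ((j + 1 : Nat) : Int) + (c : Int) by omega]
    simp only [List.flatMap_cons]
    rw [ih (j + 1) (by omega)]
    have hj : j < t.length := by omega
    rw [PySem.List.pyGetD_natCast, List.getD_eq_getElem t d hj]
    conv_rhs => rw [List.drop_eq_getElem_cons hj]
    rw [List.take_succ_cons, List.singleton_append]

-- pointwise-equal bodies give equal flatMaps (used to drop the dead dash branch)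
theorem pvFlatMapCongr (l : List Int) (f g : Int → List Char)
    (hfg : ∀ x ∈ l, f x = g x) : l.flatMap f = l.flatMap g := by
  induction l with
  | nil => rfl
  | cons a l ihl =>
    simp only [List.flatMap_cons]
    rw [hfg a (by simp), ihl (fun x hx => hfg x (by simp [hx]))]

-- one k-block of A's loop: K characters then a dash
theorem pvBlockA (u : List Char) (K : Nat) (hK : 1 ≤ K) (j : Nat) (hdvd : K ∣ j)
    (hle : j + K ≤ u.length) :
    (PySem.List.pyRange (j : Int) ((j : Int) + (K : Int))).flatMap
        (fun i => [PySem.List.pyGetD u i ' '] ++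
          if PySem.Int.mod (i + 1) (K : Int) = 0 then ['-'] else []) =
      (u.drop j).take K ++ ['-'] := by
  rw [show ((j : Int) + (K : Int)) = ((j : Int) + ((K - 1 : Nat) : Int)) + 1 by omega]
  rw [PySem.List.pyRange_one_succ_right (by omega), List.flatMap_append]
  -- the first K-1 indices produce no dash
  have hpre : (PySem.List.pyRange (j : Int) ((j : Int) + ((K - 1 : Nat) : Int))).flatMap
      (fun i => [PySem.List.pyGetD u i ' '] ++
        if PySem.Int.mod (i + 1) (K : Int) = 0 then ['-'] else []) =
      (PySem.List.pyRange (j : Int) ((j : Int) + ((K - 1 : Nat) : Int))).flatMap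
      (fun i => [PySem.List.pyGetD u i ' ']) := by
    apply pvFlatMapCongr
    intro i hi
    rw [PySem.List.mem_pyRange_one] at hi
    have hcond : ¬ PySem.Int.mod (i + 1) (K : Int) = 0 := by
      rw [PySem.Int.mod_eq_zero_iff_dvd]
      intro hd
      have h1 : (K : Int) ∣ (i + 1 - (j : Int)) :=
        dvd_sub hd (Int.natCast_dvd_natCast.mpr hdvd)
      have h2 : (0 : Int) < i + 1 - (j : Int) := by omega
      have := Int.le_of_dvd h2 h1
      omega
    rw [if_neg hcond, List.append_nil]
  rw [hpre, pvSegMap u ' ' (K - 1) j (by omega)]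
  -- the last index j+K-1 produces the dash
  rw [show ((j : Int) + ((K - 1 : Nat) : Int)) = ((j + (K - 1) : Nat) : Int) by omega]
  have hlast : PySem.Int.mod (((j + (K - 1) : Nat) : Int) + 1) (K : Int) = 0 := by
    rw [PySem.Int.mod_eq_zero_iff_dvd]
    obtain ⟨a, ha⟩ := hdvd
    refine ⟨(a : Int) + 1, ?_⟩
    have hj' : ((j + (K - 1) : Nat) : Int) + 1 = (j : Int) + (K : Int) := by omega
    rw [hj', show (j : Int) = (K : Int) * (a : Int) by exact_mod_cast ha]
    ring
  have hjK : j + (K - 1) < u.length := by omega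
  simp only [List.flatMap_cons, List.flatMap_nil, PySem.List.pyGetD_natCast]
  rw [if_pos hlast, List.getD_eq_getElem u ' ' hjK]
  conv_rhs => rw [show K = (K - 1) + 1 by omega]
  rw [List.take_succ]
  have hget : (u.drop j)[K - 1]? = some u[j + (K - 1)] := by
    rw [List.getElem?_drop]
    exact List.getElem?_eq_getElem hjK
  rw [hget]
  simp [List.append_assoc]

-- A's whole loop over a list whose length is a multiple of K, from offset j (a multiple of K)
theorem pvLoopA (u : List Char) (K : Nat) (hK : 1 ≤ K) :
    ∀ (m j : Nat), K ∣ j → j + m * K = u.length →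
    (PySem.List.pyRange (j : Int) (u.length : Int)).flatMap
        (fun i => [PySem.List.pyGetD u i ' '] ++
          if PySem.Int.mod (i + 1) (K : Int) = 0 then ['-'] else []) =
      ((chunkB K (u.drop j)).map (· ++ ['-'])).flatten := by
  intro m
  induction m with
  | zero =>
    intro j _ hlen
    have hj : j = u.length := by omega
    rw [PySem.List.pyRange_one_eq_nil (by omega)]
    subst hj
    simp [chunkB]
  | succ m ih =>
    intro j hdvd hlen
    rw [Nat.succ_mul] at hlen
    have hle : j + K ≤ u.length := by omega
    rw [PySem.List.pyRange_one_append (j : Int) ((j : Int) + (K : Int)) (u.length : Int)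
        (by omega) (by omega)]
    rw [List.flatMap_append, pvBlockA u K hK j hdvd hle]
    rw [show ((j : Int) + (K : Int)) = ((j + K : Nat) : Int) by omega]
    rw [ih (j + K) (Dvd.dvd.add hdvd dvd_rfl) (by omega)]
    have hne : u.drop j ≠ [] := by
      apply List.ne_nil_of_length_pos
      simp only [List.length_drop]
      omega
    conv_rhs => rw [chunkB]
    rw [dif_neg (by push_neg; exact ⟨hne, by omega⟩)]
    rw [List.drop_drop]
    simp [List.append_assoc]

-- range(a, b, s) for positive step peels its first element
theorem pvRangeCons (a b s : Int) (hs : 0 < s) (h : a < b) :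
    PySem.List.pyRange a b s = a :: PySem.List.pyRange (a + s) b s := by
  rw [PySem.List.pyRange_of_pos _ _ hs, PySem.List.pyRange_of_pos _ _ hs, if_pos h]
  have key : (b - a + s - 1) / s = (b - a - 1) / s + 1 := by
    rw [show b - a + s - 1 = (b - a - 1) + 1 * s by ring,
        Int.add_mul_ediv_right _ _ (by omega)]
  have hnn : 0 ≤ (b - a - 1) / s := Int.ediv_nonneg (by omega) (by omega)
  rw [key, show ((b - a - 1) / s + 1).toNat = ((b - a - 1) / s).toNat + 1 by omega,
      List.range_succ_eq_map, List.map_cons, List.map_map]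
  by_cases hb : a + s < b
  · rw [if_pos hb, show b - (a + s) + s - 1 = b - a - 1 by ring]
    simp only [CharP.cast_eq_zero, mul_zero, add_zero, List.cons.injEq, true_and]
    apply List.map_congr_left
    intro x _
    simp only [Function.comp_apply]
    push_cast
    ring
  · rw [if_neg hb]
    have hz : (b - a - 1) / s = 0 := Int.ediv_eq_zero_of_lt (by omega) (by omega)
    rw [hz]
    simp

-- B's chunk loop from offset j produces the chunk list of the dropped suffix
theorem pvChunksB (t : List Char) (K : Nat) (hK : 1 ≤ K) :
    ∀ (m j : Nat), j + m * K = t.length →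
    (PySem.List.pyRange (j : Int) (t.length : Int) (K : Int)).map
        (fun i => PySem.List.slice t (some i) (some (i + (K : Int)))) =
      chunkB K (t.drop j) := by
  intro m
  induction m with
  | zero =>
    intro j hlen
    have hj : j = t.length := by omega
    rw [PySem.List.pyRange_of_pos _ _ (by omega : (0 : Int) < (K : Int)), if_neg (by omega)]
    subst hj
    simp [chunkB]
  | succ m ih =>
    intro j hlen
    rw [Nat.succ_mul] at hlen
    have hlt : (j : Int) < (t.length : Int) := by omega
    rw [pvRangeCons _ _ _ (by omega) hlt, List.map_cons, PySem.List.slice_natCast_add,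
        show ((j : Int) + (K : Int)) = ((j + K : Nat) : Int) by omega, ih (j + K) (by omega)]
    have hne : t.drop j ≠ [] := by
      apply List.ne_nil_of_length_pos
      simp only [List.length_drop]
      omega
    conv_rhs => rw [chunkB]
    rw [dif_neg (by push_neg; exact ⟨hne, by omega⟩)]
    rw [List.drop_drop]

-- A's loop body reshaped: each step appends the character and an optional dash
theorem pvFoldlShape (v : List Char) (k : Int) (l : List Int) (acc : List Char) :
    l.foldl (fun r i =>
        if PySem.Int.mod (i + 1) k = 0 then (r ++ [PySem.List.pyGetD v i ' ']) ++ ['-']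
        else r ++ [PySem.List.pyGetD v i ' ']) acc =
      acc ++ l.flatMap (fun i => [PySem.List.pyGetD v i ' '] ++
        if PySem.Int.mod (i + 1) k = 0 then ['-'] else []) := by
  rw [← PySem.List.foldl_append_eq_flatMap]
  apply PySem.List.foldl_congr_mem
  intro acc i _
  split_ifs <;> simp

theorem pvMain (s : String) (k : Int) (hk : 1 ≤ k) :
    stringReformatting s k = stringReformatting_alt s k := by
  obtain ⟨K, rfl⟩ : ∃ K : Nat, k = (K : Int) := ⟨k.toNat, by omega⟩
  have hK : 1 ≤ K := by exact_mod_cast hk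
  unfold stringReformatting stringReformatting_alt
  dsimp only
  set t : List Char := PySem.Chars.replace s.toList ['-'] [] with ht
  set F := t.length % K with hF
  have hmod : PySem.Int.mod (PySem.Chars.len t) (K : Int) = (F : Int) := by
    rw [PySem.Chars.len_eq, hF, PySem.Int.mod_natCast]
  have hFlt : F < K := Nat.mod_lt _ (by omega)
  -- the length after removing the first block is a multiple of K
  obtain ⟨m, hm⟩ : ∃ m, F + m * K = t.length :=
    ⟨t.length / K, by have := Nat.mod_add_div' t.length K; omega⟩
  rw [hmod]
  by_cases hF0 : F = 0
  · -- no leading short chunk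
    simp only [hF0, Nat.cast_zero, if_neg (show ¬ ((0 : Int) ≠ 0) by simp)]
    rw [PySem.Chars.len_eq, pvFoldlShape]
    simp only [List.nil_append]
    have hloop := pvLoopA t K hK m 0 (Dvd.intro 0 rfl) (by omega)
    simp only [Nat.cast_zero, List.drop_zero] at hloop
    rw [hloop]
    have hchunks := pvChunksB t K hK m 0 (by omega)
    simp only [Nat.cast_zero, List.drop_zero] at hchunks
    simp only [PySem.Chars.slice_eq_listSlice, PySem.Chars.len_eq]
    rw [hchunks, PySem.List.slice_to_neg_one]
    rcases hcb : chunkB K t with _ | ⟨q, rest⟩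
    · simp [PySem.Chars.join_nil]
    · rw [pvJoinDash, List.dropLast_concat]
  · -- a leading short chunk of length F
    have hFne : ((F : Nat) : Int) ≠ 0 := by exact_mod_cast hF0
    simp only [if_pos hFne]
    simp only [PySem.Chars.slice_eq_listSlice, PySem.Chars.len_eq]
    rw [PySem.List.slice_from_natCast, PySem.List.slice_to_natCast]
    set u := t.drop F with hu
    have hul : u.length = m * K := by
      rw [hu, List.length_drop]
      omega
    rw [pvFoldlShape]
    have hloop := pvLoopA u K hK m 0 (Dvd.intro 0 rfl) (by omega)
    simp only [Nat.cast_zero, List.drop_zero] at hloop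
    rw [hloop]
    have hchunks := pvChunksB t K hK m F hm
    rw [← hu] at hchunks
    rw [hchunks, PySem.List.slice_to_neg_one]
    simp only [List.nil_append]
    rcases hcb : chunkB K u with _ | ⟨q, rest⟩
    · simp [PySem.Chars.join_singleton, List.dropLast_concat]
    · rw [pvJoinDash]
      simp only [List.singleton_append]
      rw [PySem.Chars.join_cons_cons]
      rw [show t.take F ++ ['-'] ++ (PySem.Chars.join ['-'] (q :: rest) ++ ['-'])
            = (t.take F ++ ['-'] ++ PySem.Chars.join ['-'] (q :: rest)) ++ ['-'] by
          simp [List.append_assoc]]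
      rw [List.dropLast_concat]

-- ===== VERDICT (by name: the statement is the Claim_ definition above) =====
theorem stringReformatting_spec : Claim_equal_stringReformatting := by
  intro s k _ hk
  unfold Spec_stringReformatting
  exact pvMain s k hk
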